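-- pv_equiv track=rewrite | github.com/SunsettiaSama/Algorithm_Learning | 1-数组/A3-超大型数组/Z-3-超级上升数-字节真题.py | filter_super_increasing_numbers
-- ===== SOURCE A (Python) =====
-- def is_increasing(n: int) -> bool:
--     """判断一个数是否是上升数（各位非递减）"""
--     s = list(str(n))
--     for i in range(1, len(s)):
--         if s[i] < s[i-1]:
--             return False
--     return True
--
-- def filter_super_increasing_numbers(increasing_nums: list) -> list:
--     """筛选出超级上升数：自身是上升数，且平方也是上升数"""
--     super_nums = []
--     for num in increasing_nums:
--         square = num * num
--         if is_increasing(square):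
--             super_nums.append(num)
--     # 排序（后续二分查询需要有序）
--     super_nums.sort()
--     return super_nums
-- ===== SOURCE B (Python) =====
-- def filter_super_increasing_numbers(increasing_nums: list) -> list:
--     def square_is_increasing(num):
--         s = str(num * num)
--         return s == ''.join(sorted(s))
--     return sorted(num for num in increasing_nums if square_is_increasing(num))
-- ===== Notes on version B (the rewrite author's own statement) =====
-- stated objective: simpler
-- what changed: The adjacent-pair left-to-right digit scan with early return is replaced by a sort-then-compare test (s == ''.join(sorted(s))), and the explicit accumulator loop with in-place .sort() becomes a single sorted(...) over a generator.
import Mathlib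
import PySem

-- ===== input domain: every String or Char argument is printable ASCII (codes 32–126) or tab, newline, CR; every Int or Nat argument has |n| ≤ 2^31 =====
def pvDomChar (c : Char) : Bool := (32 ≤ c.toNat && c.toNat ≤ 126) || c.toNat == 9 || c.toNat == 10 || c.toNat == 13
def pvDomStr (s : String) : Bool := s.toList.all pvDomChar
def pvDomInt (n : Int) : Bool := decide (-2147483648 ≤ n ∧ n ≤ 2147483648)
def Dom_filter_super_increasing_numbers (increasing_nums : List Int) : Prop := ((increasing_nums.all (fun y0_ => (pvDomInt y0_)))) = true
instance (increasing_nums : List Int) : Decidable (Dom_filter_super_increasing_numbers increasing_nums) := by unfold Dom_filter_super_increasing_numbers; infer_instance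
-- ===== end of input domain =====

-- B replaces A's adjacent-pair digit scan by a sort-then-compare test and the
-- accumulator loop + in-place sort by one sorted(...) over a filter (objective: simpler).

-- ===== PORT A =====
-- A's is_increasing: left-to-right scan of adjacent digit pairs with early return False
def pvIsIncreasingA : List Char → Bool
  | [] => true
  | [_] => true
  | a :: b :: t => if b < a then false else pvIsIncreasingA (b :: t)

def is_increasing (n : Int) : Bool :=
  pvIsIncreasingA (PySem.Int.toStr n).toList

def filter_super_increasing_numbers (increasing_nums : List Int) : List Int :=
  let super_nums := increasing_nums.foldl (fun acc num =>
    let square := num * num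
    if is_increasing square then acc ++ [num] else acc) []
  PySem.List.sorted super_nums (fun x => x) false

-- ===== PORT B =====
-- B's test: the digit string equals its sorted form
def pvSquareIsIncreasingB (num : Int) : Bool :=
  let s := (PySem.Int.toStr (num * num)).toList
  decide (s = PySem.List.sorted s (fun c => c) false)

def filter_super_increasing_numbers_alt (increasing_nums : List Int) : List Int :=
  PySem.List.sorted (increasing_nums.filter (fun num => pvSquareIsIncreasingB num))
    (fun x => x) false

-- ===== PRECONDITION & SPEC =====
def Spec_filter_super_increasing_numbers (increasing_nums : List Int) (out : List Int) : Prop := out = filter_super_increasing_numbers_alt increasing_nums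
instance (increasing_nums : List Int) (out : List Int) : Decidable (Spec_filter_super_increasing_numbers increasing_nums out) := by unfold Spec_filter_super_increasing_numbers; infer_instance

-- ===== CLAIM (what is proved, stated in full; the proofs are below) =====
def Claim_equal_filter_super_increasing_numbers : Prop := ∀ (increasing_nums : List Int), Dom_filter_super_increasing_numbers increasing_nums → Spec_filter_super_increasing_numbers increasing_nums (filter_super_increasing_numbers increasing_nums)

-- ===== LEMMAS AND PROOFS =====

-- A's adjacent scan accepts exactly the chains under ≤
theorem pvIsIncreasingA_iff_chain (s : List Char) :
    pvIsIncreasingA s = true ↔ List.IsChain (· ≤ ·) s := by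
  induction s with
  | nil => simpa [pvIsIncreasingA] using List.isChain_nil
  | cons a t ih =>
    cases t with
    | nil => simpa [pvIsIncreasingA] using List.isChain_singleton a
    | cons b t' =>
      simp only [pvIsIncreasingA, List.isChain_cons_cons]
      by_cases hb : b < a
      · simp [hb, not_le_of_gt hb]
      · simp [hb, ih, le_of_not_gt hb]

-- a list equals its sort (id key) iff its adjacent pairs are ≤
theorem pv_eq_sorted_iff (s : List Char) :
    (s = PySem.List.sorted s (fun c => c) false) ↔ s.Pairwise (· ≤ ·) := by
  constructor
  · intro h
    have := PySem.List.sorted_pairwise (xs := s) (key := fun c => c)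
    rw [← h] at this
    exact this
  · intro h
    exact (PySem.List.sorted_eq_self_of_pairwise (xs := s) (key := fun c => c) h).symm

theorem pv_test_eq (num : Int) :
    is_increasing (num * num) = pvSquareIsIncreasingB num := by
  unfold is_increasing pvSquareIsIncreasingB
  rw [Bool.eq_iff_iff]
  simp only [decide_eq_true_eq]
  rw [pvIsIncreasingA_iff_chain, List.isChain_iff_pairwise, pv_eq_sorted_iff]

-- ===== VERDICT (by name: the statement is the Claim_ definition above) =====
theorem filter_super_increasing_numbers_spec : Claim_equal_filter_super_increasing_numbers := by
  intro xs _
  unfold Spec_filter_super_increasing_numbers filter_super_increasing_numbers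
    filter_super_increasing_numbers_alt
  simp only []
  rw [PySem.List.foldl_append_if_eq_filter]
  congr 1
  · simp only [List.nil_append]
    apply List.filter_congr
    intro x _
    exact pv_test_eq x
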